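-- pv_equiv track=rewrite | github.com/87zdn8f8dz-collab/mm | src/discover_accounts.py | choose_from_validated_candidates
-- ===== SOURCE A (Python) =====
-- from typing import Dict, List, Optional, Tuple
--
-- def choose_from_validated_candidates(
--     preferred: List[str],
--     validated: List[str],
--     target_count: int,
-- ) -> List[str]:
--     if target_count <= 0:
--         return []
--     validated_set = set(validated)
--     selected: List[str] = []
--     seen: set[str] = set()
--
--     for account in preferred:
--         if account in validated_set and account not in seen:
--             selected.append(account)
--             seen.add(account)
--             if len(selected) >= target_count:
--                 return selected
--
--     for account in validated:
--         if account in seen: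
--             continue
--         selected.append(account)
--         seen.add(account)
--         if len(selected) >= target_count:
--             return selected
--
--     for account in preferred:
--         if account in seen:
--             continue
--         selected.append(account)
--         seen.add(account)
--         if len(selected) >= target_count:
--             return selected
--
--     return selected[:target_count]
-- ===== SOURCE B (Python) =====
-- def choose_from_validated_candidates(preferred, validated, target_count):
--     if target_count <= 0:
--         return []
--     big = len(preferred) + len(validated) + 1
--     vset = set(validated)
--     first_p = {}
--     for i, a in enumerate(preferred):
--         first_p.setdefault(a, i)
--     first_v = {}
--     for i, a in enumerate(validated):
--         first_v.setdefault(a, i)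
--
--     def rank(a):
--         if a in first_p and a in vset:
--             return first_p[a]          # preferred and validated: top band
--         if a in vset:
--             return big + first_v[a]    # validated only: middle band
--         return 2 * big + first_p[a]    # preferred only: bottom band
--
--     universe = set(preferred) | set(validated)
--     return sorted(universe, key=rank)[:target_count]
-- ===== Notes on version B (the rewrite author's own statement) =====
-- stated objective: alternative
-- what changed: Replaces A's three sequential scan-and-select passes with early returns by a rank-and-sort algorithm: every distinct account gets a numeric priority key (band by preferred/validated membership plus first-occurrence index) and the answer is the key-sorted distinct universe truncated to target_count.
import Mathlib
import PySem

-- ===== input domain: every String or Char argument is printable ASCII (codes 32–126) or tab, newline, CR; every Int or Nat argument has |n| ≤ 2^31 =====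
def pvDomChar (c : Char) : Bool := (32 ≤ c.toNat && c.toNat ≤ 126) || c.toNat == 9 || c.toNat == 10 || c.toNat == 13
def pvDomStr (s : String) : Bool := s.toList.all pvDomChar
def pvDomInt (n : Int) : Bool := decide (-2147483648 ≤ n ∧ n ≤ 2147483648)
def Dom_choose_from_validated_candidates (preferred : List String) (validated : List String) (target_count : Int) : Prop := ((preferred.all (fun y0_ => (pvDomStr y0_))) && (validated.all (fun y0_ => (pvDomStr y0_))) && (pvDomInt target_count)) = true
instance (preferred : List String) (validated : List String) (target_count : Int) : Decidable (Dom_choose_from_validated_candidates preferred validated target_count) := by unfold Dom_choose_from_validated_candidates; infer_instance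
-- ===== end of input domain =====

-- B replaces A's three sequential scan-and-select passes (each with early return) by a
-- rank-and-sort algorithm: each distinct account gets a numeric priority key and the
-- answer is the key-sorted distinct universe truncated to target_count (objective: alternative).

-- ===== PORT A =====
-- A's first loop over `preferred`: selects accounts in validated_set and not yet seen;
-- .inr = early return (len(selected) >= target_count), .inl = loop finished with final state.
def aLoop1 (vset : PySem.Set String) (t : Int) : List String → List String → PySem.Set String → (List String × PySem.Set String) ⊕ List String
  | [], sel, seen => .inl (sel, seen)
  | a :: rest, sel, seen =>
    if vset.contains a && ! seen.contains a then
      let sel' := sel ++ [a]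
      let seen' := seen.add a
      if t ≤ (sel'.length : Int) then .inr sel' else aLoop1 vset t rest sel' seen'
    else aLoop1 vset t rest sel seen

-- A's second and third loops (identical bodies): skip seen accounts, select the rest.
def aLoop (t : Int) : List String → List String → PySem.Set String → (List String × PySem.Set String) ⊕ List String
  | [], sel, seen => .inl (sel, seen)
  | a :: rest, sel, seen =>
    if seen.contains a then aLoop t rest sel seen
    else
      let sel' := sel ++ [a]
      let seen' := seen.add a
      if t ≤ (sel'.length : Int) then .inr sel' else aLoop t rest sel' seen'

def choose_from_validated_candidates (preferred : List String) (validated : List String) (target_count : Int) : List String :=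
  if target_count ≤ 0 then []
  else
    let vset := PySem.Set.ofList validated
    match aLoop1 vset target_count preferred [] PySem.Set.empty with
    | .inr r => r
    | .inl (sel1, seen1) =>
      match aLoop target_count validated sel1 seen1 with
      | .inr r => r
      | .inl (sel2, seen2) =>
        match aLoop target_count preferred sel2 seen2 with
        | .inr r => r
        | .inl (sel3, _) => PySem.List.slice sel3 none (some target_count)   -- selected[:target_count]

-- ===== PORT B =====
-- B's setdefault loop: dict mapping each account to its first index in l
-- ('for i, a in enumerate(l): d.setdefault(a, i)').
def bFirstIdx (l : List String) : PySem.Dict String Int :=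
  (PySem.List.enumerate l).foldl (fun d p => d.setdefault p.2 p.1) PySem.Dict.empty

-- B's nested 'def rank(a)'. rank is only applied to members of the universe, where the
-- dict key looked up is always present, so 'getD _ 0' is exact for Python's 'd[a]'.
def bRank (first_p first_v : PySem.Dict String Int) (vset : PySem.Set String) (big : Int) (a : String) : Int :=
  if first_p.contains a && vset.contains a then first_p.getD a 0
  else if vset.contains a then big + first_v.getD a 0
  else 2 * big + first_p.getD a 0

def choose_from_validated_candidates_alt (preferred : List String) (validated : List String) (target_count : Int) : List String :=
  if target_count ≤ 0 then []
  else
    let big : Int := (preferred.length : Int) + (validated.length : Int) + 1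
    let vset := PySem.Set.ofList validated
    let first_p := bFirstIdx preferred
    let first_v := bFirstIdx validated
    let univ := PySem.Set.union (PySem.Set.ofList preferred) (PySem.Set.ofList validated)
    PySem.List.slice (PySem.List.sorted univ (bRank first_p first_v vset big)) none (some target_count)

-- ===== PRECONDITION & SPEC =====
def Spec_choose_from_validated_candidates (preferred : List String) (validated : List String) (target_count : Int) (out : List String) : Prop := out = choose_from_validated_candidates_alt preferred validated target_count
instance (preferred : List String) (validated : List String) (target_count : Int) (out : List String) : Decidable (Spec_choose_from_validated_candidates preferred validated target_count out) := by unfold Spec_choose_from_validated_candidates; infer_instance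

-- ===== CLAIM (what is proved, stated in full; the proofs are below) =====
def Claim_equal_choose_from_validated_candidates : Prop := ∀ (preferred : List String) (validated : List String) (target_count : Int), Dom_choose_from_validated_candidates preferred validated target_count → Spec_choose_from_validated_candidates preferred validated target_count (choose_from_validated_candidates preferred validated target_count)

-- ===== LEMMAS AND PROOFS =====

-- Proof-side: one deduplicating pass with early stop (what A's three chained loops amount to).
def chainLoop (t : Int) : List String → List String → PySem.Set String → List String
  | [], sel, _ => sel
  | a :: rest, sel, seen =>
    if seen.contains a then chainLoop t rest sel seen
    else
      let sel' := sel ++ [a]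
      let seen' := seen.add a
      if t ≤ (sel'.length : Int) then sel' else chainLoop t rest sel' seen'

-- Proof-side: the elements of l not in seen, first occurrences, in order.
def freshOf (seen : PySem.Set String) : List String → List String
  | [] => []
  | a :: rest => if seen.contains a then freshOf seen rest else a :: freshOf (seen.add a) rest

theorem chainLoop_append (t : Int) (l1 l2 : List String) (sel : List String) (seen : PySem.Set String) :
    chainLoop t (l1 ++ l2) sel seen =
      (match aLoop t l1 sel seen with
       | .inl (sel', seen') => chainLoop t l2 sel' seen'
       | .inr r => r) := by
  induction l1 generalizing sel seen with
  | nil => simp [aLoop]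
  | cons a rest ih =>
    simp only [List.cons_append, chainLoop, aLoop]
    by_cases h : a ∈ seen
    · simp [h, ih]
    · by_cases ht : t ≤ (sel.length : Int) + 1
      · simp [h, ht]
      · simp [h, ht, ih]

-- A's first loop (membership test inline) = A's segment loop over the filtered list.
theorem aLoop1_eq_filter (vset : PySem.Set String) (t : Int) (l : List String) (sel : List String) (seen : PySem.Set String) :
    aLoop1 vset t l sel seen = aLoop t (l.filter (fun a => vset.contains a)) sel seen := by
  induction l generalizing sel seen with
  | nil => simp [aLoop1, aLoop]
  | cons a rest ih =>
    by_cases hv : a ∈ vset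
    · by_cases hs : a ∈ seen
      · simp [aLoop1, aLoop, hv, hs, ih]
      · by_cases ht : t ≤ (sel.length : Int) + 1
        · simp [aLoop1, aLoop, hv, hs, ht]
        · simp [aLoop1, aLoop, hv, hs, ht, ih]
    · simp [aLoop1, hv, ih]

theorem chainLoop_eq_aLoop (t : Int) (l : List String) (sel : List String) (seen : PySem.Set String) :
    chainLoop t l sel seen =
      (match aLoop t l sel seen with
       | .inl (sel', _) => sel'
       | .inr r => r) := by
  induction l generalizing sel seen with
  | nil => simp [chainLoop, aLoop]
  | cons a rest ih =>
    simp only [chainLoop, aLoop]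
    by_cases h : a ∈ seen
    · simp [h, ih]
    · by_cases ht : t ≤ (sel.length : Int) + 1
      · simp [h, ht]
      · simp [h, ht, ih]

-- If a segment loop finishes without early return, selected stays shorter than target_count.
theorem aLoop_inl_length_lt (t : Int) (l : List String) (sel : List String) (seen : PySem.Set String)
    (sel' : List String) (seen' : PySem.Set String)
    (h : aLoop t l sel seen = .inl (sel', seen')) (hlt : (sel.length : Int) < t) :
    (sel'.length : Int) < t := by
  induction l generalizing sel seen with
  | nil =>
    simp only [aLoop, Sum.inl.injEq, Prod.mk.injEq] at h
    obtain ⟨h1, -⟩ := h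
    subst h1; exact hlt
  | cons a rest ih =>
    simp only [aLoop] at h
    split at h
    · exact ih _ _ h hlt
    · split at h
      · simp at h
      · next ht => exact ih _ _ h (by simp at ht ⊢; omega)

-- A, past the t ≤ 0 guard, is the single dedup-and-select pass over the priority stream.
theorem chainA (preferred validated : List String) (t : Int) (h0 : ¬ t ≤ 0) :
    choose_from_validated_candidates preferred validated t =
      chainLoop t ((preferred.filter (fun a => (PySem.Set.ofList validated).contains a)) ++ validated ++ preferred) [] PySem.Set.empty := by
  unfold choose_from_validated_candidates
  simp only [h0, if_false]
  rw [List.append_assoc, chainLoop_append, aLoop1_eq_filter]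
  cases h1 : aLoop t (preferred.filter fun a => (PySem.Set.ofList validated).contains a) [] PySem.Set.empty with
  | inr r => rfl
  | inl p1 =>
    obtain ⟨sel1, seen1⟩ := p1
    simp only [chainLoop_append]
    cases h2 : aLoop t validated sel1 seen1 with
    | inr r => rfl
    | inl p2 =>
      obtain ⟨sel2, seen2⟩ := p2
      simp only [chainLoop_eq_aLoop]
      cases h3 : aLoop t preferred sel2 seen2 with
      | inr r => rfl
      | inl p3 =>
        obtain ⟨sel3, seen3⟩ := p3
        have l1 : ((sel1 : List String).length : Int) < t :=
          aLoop_inl_length_lt t _ [] PySem.Set.empty sel1 seen1 h1 (by simp; omega)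
        have l2 : ((sel2 : List String).length : Int) < t :=
          aLoop_inl_length_lt t validated sel1 seen1 sel2 seen2 h2 l1
        have l3 : ((sel3 : List String).length : Int) < t :=
          aLoop_inl_length_lt t preferred sel2 seen2 sel3 seen3 h3 l2
        have ht : t = ((t.toNat : Nat) : Int) := by omega
        show PySem.List.slice sel3 none (some t) = sel3
        rw [ht, PySem.List.slice_to_natCast]
        exact List.take_of_length_le (by omega)

-- The dedup pass returns sel plus the first fresh elements, up to the target length.
theorem chainLoop_fresh (t : Int) (l : List String) (sel : List String) (seen : PySem.Set String)
    (hlt : (sel.length : Int) < t) :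
    chainLoop t l sel seen = sel ++ (freshOf seen l).take (t.toNat - sel.length) := by
  induction l generalizing sel seen with
  | nil => simp [chainLoop, freshOf]
  | cons a rest ih =>
    simp only [chainLoop, freshOf]
    by_cases h : a ∈ seen
    · simp [h, ih _ _ hlt]
    · by_cases ht : t ≤ (sel.length : Int) + 1
      · have : t.toNat - sel.length = 1 := by omega
        simp [h, ht, this]
      · have h1 : t.toNat - sel.length = (t.toNat - (sel.length + 1)) + 1 := by omega
        simp only [h, ite_false, PySem.Set.contains_eq_listContains,
          List.contains_eq_mem, decide_eq_true_eq]
        rw [if_neg (by simpa using ht), ih _ _ (by simp; omega), h1]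
        simp [List.take_succ_cons]

theorem mem_freshOf (seen : PySem.Set String) (l : List String) (x : String) :
    x ∈ freshOf seen l ↔ x ∈ l ∧ x ∉ seen := by
  induction l generalizing seen with
  | nil => simp [freshOf]
  | cons a rest ih =>
    by_cases h : a ∈ seen
    · simp only [freshOf, PySem.Set.contains_eq_listContains, List.contains_eq_mem, h,
        decide_true, ite_true, ih, List.mem_cons]
      constructor
      · rintro ⟨hr, hs⟩; exact ⟨Or.inr hr, hs⟩
      · rintro ⟨hr | hr, hs⟩
        · subst hr; exact absurd h hs
        · exact ⟨hr, hs⟩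
    · simp only [freshOf, PySem.Set.contains_eq_listContains, List.contains_eq_mem, h,
        decide_false, Bool.false_eq_true, ite_false, List.mem_cons, ih, PySem.Set.mem_add]
      constructor
      · rintro (hx | ⟨hr, hs⟩)
        · subst hx; exact ⟨Or.inl rfl, h⟩
        · exact ⟨Or.inr hr, fun hx => hs (Or.inl hx)⟩
      · rintro ⟨hx | hx, hs⟩
        · exact Or.inl hx
        · by_cases hxa : x = a
          · exact Or.inl hxa
          · exact Or.inr ⟨hx, fun hc => (hc.elim hs hxa)⟩

-- The fresh elements come in order of first occurrence in l.
theorem freshOf_pairwise_idxOf (seen : PySem.Set String) (l : List String) :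
    (freshOf seen l).Pairwise (fun a b => l.idxOf a < l.idxOf b) := by
  induction l generalizing seen with
  | nil => simp [freshOf]
  | cons a rest ih =>
    by_cases h : a ∈ seen
    · simp only [freshOf, PySem.Set.contains_eq_listContains, List.contains_eq_mem, h,
        decide_true, ite_true]
      refine (ih seen).imp_of_mem ?_
      intro x y hx hy hxy
      have hxs := ((mem_freshOf seen rest x).mp hx).2
      have hys := ((mem_freshOf seen rest y).mp hy).2
      have hxa : x ≠ a := fun hc => hxs (hc ▸ h)
      have hya : y ≠ a := fun hc => hys (hc ▸ h)
      rw [List.idxOf_cons_ne rest hxa.symm, List.idxOf_cons_ne rest hya.symm]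
      omega
    · simp only [freshOf, PySem.Set.contains_eq_listContains, List.contains_eq_mem, h,
        decide_false, Bool.false_eq_true, ite_false]
      constructor
      · intro y hy
        have hys := ((mem_freshOf _ rest y).mp hy).2
        have hya : y ≠ a := fun hc => hys (hc ▸ (PySem.Set.mem_add _ _ _).mpr (Or.inr rfl))
        rw [List.idxOf_cons_self, List.idxOf_cons_ne rest hya.symm]
        omega
      · refine (ih (seen.add a)).imp_of_mem ?_
        intro x y hx hy hxy
        have hxs := ((mem_freshOf _ rest x).mp hx).2
        have hys := ((mem_freshOf _ rest y).mp hy).2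
        have hxa : x ≠ a := fun hc => hxs (hc ▸ (PySem.Set.mem_add _ _ _).mpr (Or.inr rfl))
        have hya : y ≠ a := fun hc => hys (hc ▸ (PySem.Set.mem_add _ _ _).mpr (Or.inr rfl))
        rw [List.idxOf_cons_ne rest hxa.symm, List.idxOf_cons_ne rest hya.symm]
        omega

theorem freshOf_append (seen : PySem.Set String) (l1 l2 : List String) :
    freshOf seen (l1 ++ l2) = freshOf seen l1 ++ freshOf (seen.update l1) l2 := by
  induction l1 generalizing seen with
  | nil => simp [freshOf, PySem.Set.update_nil]
  | cons a rest ih =>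
    by_cases h : a ∈ seen
    · simp only [List.cons_append, freshOf, PySem.Set.contains_eq_listContains,
        List.contains_eq_mem, h, decide_true, ite_true, ih, PySem.Set.update_cons,
        PySem.Set.add_of_mem h]
    · simp only [List.cons_append, freshOf, PySem.Set.contains_eq_listContains,
        List.contains_eq_mem, h, decide_false, Bool.false_eq_true, ite_false, ih,
        PySem.Set.update_cons, List.cons_append]

-- Characterisation of the setdefault loop with arbitrary start index and dict.
theorem bFirstIdx_fold_get? (l : List String) (s : Int) (d : PySem.Dict String Int) (x : String) :
    ((PySem.List.enumerate l s).foldl (fun d p => d.setdefault p.2 p.1) d).get? x =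
      if (d.get? x).isSome then d.get? x
      else if x ∈ l then some (s + l.idxOf x) else none := by
  induction l generalizing s d with
  | nil => simp [PySem.List.enumerate]
  | cons a rest ih =>
    rw [PySem.List.enumerate_cons]
    simp only [List.foldl_cons, ih]
    have hsd : d.setdefault a s = if d.contains a then d else d.insert a s := by
      by_cases h : d.contains a <;> simp [PySem.Dict.setdefault, PySem.Dict.insert, h]
    by_cases hda : d.contains a
    · rw [hsd, if_pos hda]
      by_cases hdx : (d.get? x).isSome
      · simp [hdx]
      · simp only [hdx, Bool.false_eq_true, ite_false]
        by_cases hxa : x = a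
        · subst hxa
          rw [PySem.Dict.contains_eq_isSome_get?] at hda
          exact absurd hda (by simp [hdx])
        · simp [hxa, List.idxOf_cons_ne rest (fun hc => hxa hc.symm)]
          by_cases hxr : x ∈ rest
          · simp [hxr]; omega
          · simp [hxr]
    · rw [hsd, if_neg hda]
      by_cases hxa : x = a
      · subst hxa
        have : (d.insert x s).get? x = some s := PySem.Dict.get?_insert_self d x s
        rw [PySem.Dict.contains_eq_isSome_get?] at hda
        simp [this, List.idxOf_cons_self, Bool.not_eq_true] at hda ⊢
        simp [hda]
      · have : (d.insert a s).get? x = d.get? x := PySem.Dict.get?_insert_of_ne d s hxa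
        rw [this]
        by_cases hdx : (d.get? x).isSome
        · simp [hdx]
        · simp only [hdx, Bool.false_eq_true, ite_false]
          simp [hxa, List.idxOf_cons_ne rest (fun hc => hxa hc.symm)]
          by_cases hxr : x ∈ rest
          · simp [hxr]; omega
          · simp [hxr]

theorem bFirstIdx_get? (l : List String) (x : String) :
    (bFirstIdx l).get? x = if x ∈ l then some ((l.idxOf x : Int)) else none := by
  unfold bFirstIdx
  rw [show PySem.List.enumerate l = PySem.List.enumerate l 0 from rfl,
    bFirstIdx_fold_get? l 0 PySem.Dict.empty x]
  simp [PySem.Dict.get?_empty]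

theorem bFirstIdx_contains (l : List String) (x : String) :
    (bFirstIdx l).contains x = decide (x ∈ l) := by
  rw [PySem.Dict.contains_eq_isSome_get?, bFirstIdx_get? l x]
  by_cases h : x ∈ l <;> simp [h]

theorem bFirstIdx_getD (l : List String) (x : String) (h : x ∈ l) :
    (bFirstIdx l).getD x 0 = (l.idxOf x : Int) := by
  rw [PySem.Dict.getD_eq_get?_getD, bFirstIdx_get? l x, if_pos h]
  rfl

-- rank on the three bands.
theorem bRank_band0 (P V : List String) (big : Int) (x : String) (hp : x ∈ P) (hv : x ∈ V) :
    bRank (bFirstIdx P) (bFirstIdx V) (PySem.Set.ofList V) big x = (P.idxOf x : Int) := by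
  simp [bRank, bFirstIdx_contains, hp, PySem.Set.mem_ofList, hv, bFirstIdx_getD P x hp]

theorem bRank_band1 (P V : List String) (big : Int) (x : String) (hp : x ∉ P) (hv : x ∈ V) :
    bRank (bFirstIdx P) (bFirstIdx V) (PySem.Set.ofList V) big x = big + (V.idxOf x : Int) := by
  simp [bRank, bFirstIdx_contains, hp, PySem.Set.mem_ofList, hv, bFirstIdx_getD V x hv]

theorem bRank_band2 (P V : List String) (big : Int) (x : String) (hp : x ∈ P) (hv : x ∉ V) :
    bRank (bFirstIdx P) (bFirstIdx V) (PySem.Set.ofList V) big x = 2 * big + (P.idxOf x : Int) := by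
  simp [bRank, bFirstIdx_contains, hp, PySem.Set.mem_ofList, hv, bFirstIdx_getD P x hp]

-- First-occurrence order survives filtering: for members of the filtered list,
-- earlier there means earlier in the original.
theorem idxOf_filter_mono (l : List String) (p : String → Bool) (a b : String)
    (ha : a ∈ l.filter p) (hb : b ∈ l.filter p)
    (h : (l.filter p).idxOf a < (l.filter p).idxOf b) : l.idxOf a < l.idxOf b := by
  induction l with
  | nil => simp at ha
  | cons c rest ih =>
    by_cases hpc : p c
    · rw [List.filter_cons_of_pos hpc] at ha hb h
      by_cases hac : a = c
      · subst hac
        have hbc : b ≠ a := by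
          intro hc; subst hc; simp at h
        rw [List.idxOf_cons_self] at h ⊢
        rw [List.idxOf_cons_ne rest hbc.symm]
        omega
      · have hbc : b ≠ c := by
          intro hc; subst hc
          rw [List.idxOf_cons_self] at h
          omega
        rw [List.idxOf_cons_ne _ (fun hc => hac hc.symm),
          List.idxOf_cons_ne _ (fun hc => hbc hc.symm)] at h
        have := ih (by simpa [hac] using ha) (by simpa [hbc] using hb) (by omega)
        rw [List.idxOf_cons_ne rest (fun hc => hac hc.symm),
          List.idxOf_cons_ne rest (fun hc => hbc hc.symm)]
        omega
    · rw [List.filter_cons_of_neg (by simpa using hpc)] at ha hb h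
      have hac : a ≠ c := by
        intro hc; subst hc
        have := (List.mem_filter.mp ha).2; exact hpc (by simpa using this)
      have hbc : b ≠ c := by
        intro hc; subst hc
        have := (List.mem_filter.mp hb).2; exact hpc (by simpa using this)
      have := ih ha hb h
      rw [List.idxOf_cons_ne rest (fun hc => hac hc.symm),
        List.idxOf_cons_ne rest (fun hc => hbc hc.symm)]
      omega

-- ===== VERDICT (by name: the statement is the Claim_ definition above) =====
theorem choose_from_validated_candidates_spec : Claim_equal_choose_from_validated_candidates := by
  intro P V t _
  unfold Spec_choose_from_validated_candidates
  by_cases h0 : t ≤ 0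
  · unfold choose_from_validated_candidates choose_from_validated_candidates_alt
    simp [h0]
  · rw [chainA P V t h0]
    unfold choose_from_validated_candidates_alt
    simp only [h0, if_false]
    set big : Int := (P.length : Int) + (V.length : Int) + 1 with hbig
    set filterP := P.filter (fun a => (PySem.Set.ofList V).contains a) with hfP
    set stream := filterP ++ V ++ P with hstream
    set rank := bRank (bFirstIdx P) (bFirstIdx V) (PySem.Set.ofList V) big with hrank
    -- the fresh pass over the stream
    have hD : chainLoop t stream [] PySem.Set.empty = (freshOf PySem.Set.empty stream).take t.toNat := by
      rw [chainLoop_fresh t stream [] PySem.Set.empty (by simp; omega)]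
      simp
    rw [hD]
    -- decompose the dedup of the stream into the three bands
    have hsplit : freshOf PySem.Set.empty stream =
        freshOf PySem.Set.empty filterP ++ (freshOf (PySem.Set.update PySem.Set.empty filterP) V ++
          freshOf (PySem.Set.update (PySem.Set.update PySem.Set.empty filterP) V) P) := by
      rw [hstream, List.append_assoc, freshOf_append, freshOf_append]
    set s1 := PySem.Set.update PySem.Set.empty filterP with hs1
    set s2 := PySem.Set.update s1 V with hs2
    have hmem_s1 : ∀ x, x ∈ s1 ↔ x ∈ filterP := by
      intro x; rw [hs1]; simp [PySem.Set.mem_update]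
    have hmem_s2 : ∀ x, x ∈ s2 ↔ x ∈ filterP ∨ x ∈ V := by
      intro x; rw [hs2]; simp [PySem.Set.mem_update, hmem_s1]
    have hmem_fP : ∀ x, x ∈ filterP ↔ x ∈ P ∧ x ∈ V := by
      intro x; rw [hfP]; simp [List.mem_filter, PySem.Set.mem_ofList]
    -- the three bands' rank values
    have hr0 : ∀ x ∈ freshOf PySem.Set.empty filterP, rank x = (P.idxOf x : Int) ∧ x ∈ P ∧ x ∈ V := by
      intro x hx
      have hxf := ((mem_freshOf _ _ x).mp hx).1
      obtain ⟨hp, hv⟩ := (hmem_fP x).mp hxf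
      exact ⟨bRank_band0 P V big x hp hv, hp, hv⟩
    have hr1 : ∀ x ∈ freshOf s1 V, rank x = big + (V.idxOf x : Int) ∧ x ∈ V := by
      intro x hx
      obtain ⟨hxv, hxs⟩ := (mem_freshOf _ _ x).mp hx
      have hxp : x ∉ P := fun hp => hxs ((hmem_s1 x).mpr ((hmem_fP x).mpr ⟨hp, hxv⟩))
      exact ⟨bRank_band1 P V big x hxp hxv, hxv⟩
    have hr2 : ∀ x ∈ freshOf s2 P, rank x = 2 * big + (P.idxOf x : Int) ∧ x ∈ P := by
      intro x hx
      obtain ⟨hxp, hxs⟩ := (mem_freshOf _ _ x).mp hx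
      have hxv : x ∉ V := fun hv => hxs ((hmem_s2 x).mpr (Or.inr hv))
      exact ⟨bRank_band2 P V big x hxp hxv, hxp⟩
    -- rank is strictly increasing along the dedup of the stream
    have hpw : (freshOf PySem.Set.empty stream).Pairwise (fun a b => rank a < rank b) := by
      rw [hsplit]
      have pw0 : (freshOf PySem.Set.empty filterP).Pairwise (fun a b => rank a < rank b) := by
        refine (freshOf_pairwise_idxOf PySem.Set.empty filterP).imp_of_mem ?_
        intro a b ha hb hab
        obtain ⟨hra, hpa, hva⟩ := hr0 a ha
        obtain ⟨hrb, hpb, hvb⟩ := hr0 b hb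
        rw [hra, hrb]
        have := idxOf_filter_mono P _ a b (hfP ▸ ((mem_freshOf _ _ a).mp ha).1)
          (hfP ▸ ((mem_freshOf _ _ b).mp hb).1) hab
        omega
      have pw1 : (freshOf s1 V).Pairwise (fun a b => rank a < rank b) := by
        refine (freshOf_pairwise_idxOf s1 V).imp_of_mem ?_
        intro a b ha hb hab
        obtain ⟨hra, -⟩ := hr1 a ha
        obtain ⟨hrb, -⟩ := hr1 b hb
        rw [hra, hrb]; omega
      have pw2 : (freshOf s2 P).Pairwise (fun a b => rank a < rank b) := by
        refine (freshOf_pairwise_idxOf s2 P).imp_of_mem ?_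
        intro a b ha hb hab
        obtain ⟨hra, -⟩ := hr2 a ha
        obtain ⟨hrb, -⟩ := hr2 b hb
        rw [hra, hrb]; omega
      rw [List.pairwise_append]
      refine ⟨pw0, ?_, ?_⟩
      · rw [List.pairwise_append]
        refine ⟨pw1, pw2, ?_⟩
        intro a ha b hb
        obtain ⟨hra, hva⟩ := hr1 a ha
        obtain ⟨hrb, hpb⟩ := hr2 b hb
        have hia : V.idxOf a < V.length := List.idxOf_lt_length_of_mem hva
        rw [hra, hrb, hbig]
        omega
      · intro a ha b hb
        obtain ⟨hra, hpa, -⟩ := hr0 a ha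
        have hia : P.idxOf a < P.length := List.idxOf_lt_length_of_mem hpa
        rcases List.mem_append.mp hb with hb1 | hb2
        · obtain ⟨hrb, -⟩ := hr1 b hb1
          rw [hra, hrb, hbig]; omega
        · obtain ⟨hrb, -⟩ := hr2 b hb2
          rw [hra, hrb, hbig]; omega
    -- the dedup of the stream is a permutation of the universe
    have hnodup : (freshOf PySem.Set.empty stream).Nodup :=
      hpw.imp (fun {a b} h => fun hc => by subst hc; omega)
    have hperm : (freshOf PySem.Set.empty stream).Perm
        (PySem.Set.union (PySem.Set.ofList P) (PySem.Set.ofList V)) := by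
      rw [List.perm_ext_iff_of_nodup hnodup (PySem.Set.nodup_union _ _ (PySem.Set.nodup_ofList P))]
      intro x
      rw [mem_freshOf, PySem.Set.mem_union]
      simp only [hstream, List.mem_append, hmem_fP x, PySem.Set.mem_ofList]
      constructor
      · rintro ⟨h, -⟩
        rcases h with (⟨hp, -⟩ | hv) | hp
        · exact Or.inl hp
        · exact Or.inr hv
        · exact Or.inl hp
      · rintro (hp | hv)
        · exact ⟨Or.inr hp, by simp⟩
        · exact ⟨Or.inl (Or.inr hv), by simp⟩
    -- hence B's sorted universe is exactly that dedup list
    rw [PySem.List.sorted_eq_of_perm_of_pairwise_lt _ _ rank hperm hpw]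
    exact (PySem.List.slice_to _ (by omega : (0:Int) ≤ t)).symm
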